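-- pv_equiv track=rewrite | github.com/DinCarmon/SudokuSolver | Solver/solver.py | remove_uninflicted_positions
-- ===== SOURCE A (Python) =====
-- def remove_uninflicted_positions(row, col, l = None):
--     """
--     Given a list of positions in the grid l, positions which are not directly influenced by
--     :param row1:
--     :param col1:
--     :param l:
--     :return:
--     """
--     if l is None:
--         l = [(i, j) for i in range(9) for j in range(9)]
--     if (row, col) in l:
--         l.remove((row, col))
--     l_copy = l.copy()
--     for r,c in l_copy:
--         if r != row and \
--             c != col and \
--             not(r // 3 == row // 3 and c // 3 == col // 3):
--             l.remove((r,c))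
--     return l
-- ===== SOURCE B (Python) =====
-- def remove_uninflicted_positions(row, col, l=None):
--     given = l is not None
--     cells = l if given else [(i, j) for i in range(9) for j in range(9)]
--     out = []
--     dropped = False
--     for (r, c) in cells:
--         if not dropped and r == row and c == col:
--             dropped = True
--             continue
--         if r == row or c == col or (r // 3 == row // 3 and c // 3 == col // 3):
--             out.append((r, c))
--     if given:
--         l[:] = out
--         return l
--     return out
-- ===== Notes on version B (the rewrite author's own statement) =====
-- stated objective: alternative
-- what changed: Replaces A's membership-check-plus-remove and copy-then-repeated-list.remove deletion loop (O(n^2) rescans) with one forward pass carrying a dropped-flag that skips the first (row,col) and appends conflicting cells to a fresh output list assigned back in place.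
import Mathlib
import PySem

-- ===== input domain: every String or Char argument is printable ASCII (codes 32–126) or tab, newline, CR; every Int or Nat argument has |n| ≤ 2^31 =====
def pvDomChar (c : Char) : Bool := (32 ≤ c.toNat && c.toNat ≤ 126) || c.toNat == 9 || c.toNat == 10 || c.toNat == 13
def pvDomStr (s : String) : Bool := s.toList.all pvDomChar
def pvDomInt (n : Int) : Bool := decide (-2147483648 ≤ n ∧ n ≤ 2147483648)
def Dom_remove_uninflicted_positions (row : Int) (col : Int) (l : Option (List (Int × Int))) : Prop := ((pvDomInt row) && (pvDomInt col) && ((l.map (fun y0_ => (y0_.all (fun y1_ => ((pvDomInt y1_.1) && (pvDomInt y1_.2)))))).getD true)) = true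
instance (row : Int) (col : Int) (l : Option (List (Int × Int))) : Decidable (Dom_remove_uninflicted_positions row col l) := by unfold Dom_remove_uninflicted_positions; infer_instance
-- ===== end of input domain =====

-- B replaces A's pre-removal of (row,col) plus copy-then-repeated-list.remove
-- deletion loop with ONE forward pass carrying a 'dropped' flag that skips the
-- first occurrence of (row,col) and appends the conflicting cells to a fresh
-- output list. Both mutate the given list in place; equivalence proved here is
-- about the return value (B performs the same in-place update via l[:] = out).

-- ===== PORT A =====
-- [(i, j) for i in range(9) for j in range(9)]  (same comprehension in both sources)
def pvGrid : List (Int × Int) :=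
  (PySem.List.pyRange 0 9 1).flatMap (fun i => (PySem.List.pyRange 0 9 1).map (fun j => (i, j)))

-- l.remove(v): drop the first occurrence; the none branch (ValueError) is
-- unreachable at A's call sites (membership / count is checked or preserved)
def pvRemoveStep {α : Type} [BEq α] (acc : List α) (p : α) : List α :=
  match PySem.List.remove? acc p with
  | some acc' => acc'
  | none => acc

-- if (row, col) in l: l.remove((row, col))
def pvDropSelfA (row col : Int) (l : List (Int × Int)) : List (Int × Int) :=
  if (row, col) ∈ l then pvRemoveStep l (row, col) else l

def remove_uninflicted_positions (row : Int) (col : Int) (l : Option (List (Int × Int))) : List (Int × Int) :=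
  let l0 := match l with | none => pvGrid | some xs => xs
  let l1 := pvDropSelfA row col l0
  -- l_copy = l.copy(); for r,c in l_copy: if …: l.remove((r,c))
  l1.foldl (fun acc p =>
    if p.1 ≠ row ∧ p.2 ≠ col ∧
        ¬(PySem.Int.floordiv p.1 3 = PySem.Int.floordiv row 3 ∧
          PySem.Int.floordiv p.2 3 = PySem.Int.floordiv col 3) then
      pvRemoveStep acc p
    else acc) l1

-- ===== PORT B =====
-- the keep-test of B's single pass: r == row or c == col or same 3x3 box
def pvKeepB (row col : Int) (p : Int × Int) : Bool :=
  p.1 == row || p.2 == col ||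
    (PySem.Int.floordiv p.1 3 == PySem.Int.floordiv row 3 &&
     PySem.Int.floordiv p.2 3 == PySem.Int.floordiv col 3)

-- for (r,c) in cells: … — one pass over (dropped, out)
def pvPassB (row col : Int) (st : Bool × List (Int × Int)) (p : Int × Int) :
    Bool × List (Int × Int) :=
  if !st.1 && p.1 == row && p.2 == col then (true, st.2)
  else if pvKeepB row col p then (st.1, st.2 ++ [p])
  else st

def remove_uninflicted_positions_alt (row : Int) (col : Int) (l : Option (List (Int × Int))) : List (Int × Int) :=
  let cells := match l with | none => pvGrid | some xs => xs
  (cells.foldl (pvPassB row col) (false, [])).2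

-- ===== PRECONDITION & SPEC =====
def Spec_remove_uninflicted_positions (row : Int) (col : Int) (l : Option (List (Int × Int))) (out : List (Int × Int)) : Prop := out = remove_uninflicted_positions_alt row col l
instance (row : Int) (col : Int) (l : Option (List (Int × Int))) (out : List (Int × Int)) : Decidable (Spec_remove_uninflicted_positions row col l out) := by unfold Spec_remove_uninflicted_positions; infer_instance

-- ===== CLAIM (what is proved, stated in full; the proofs are below) =====
def Claim_equal_remove_uninflicted_positions : Prop := ∀ (row : Int) (col : Int) (l : Option (List (Int × Int))), Dom_remove_uninflicted_positions row col l → Spec_remove_uninflicted_positions row col l (remove_uninflicted_positions row col l)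

-- ===== LEMMAS AND PROOFS =====

-- erasing an element the filter drops anyway does not change the filter
theorem filter_erase_of_neg {α : Type} [BEq α] [LawfulBEq α] (q : α → Bool) (y : α)
    (hy : q y = false) : ∀ xs : List α, (xs.erase y).filter q = xs.filter q := by
  intro xs
  induction xs with
  | nil => rfl
  | cons x xs ih =>
    by_cases hx : x = y
    · subst hx; rw [List.erase_cons_head, List.filter_cons_of_neg (by simp [hy])]
    · rw [List.erase_cons_tail (by simp [hx]), List.filter_cons, List.filter_cons, ih]

-- if no bad element occurs in xs, the negative filter keeps everything
theorem filter_of_no_bad {α : Type} [BEq α] [LawfulBEq α] (q : α → Prop) [DecidablePred q] :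
    ∀ xs : List α, (∀ p, q p → p ∉ xs) → xs.filter (fun p => !decide (q p)) = xs := by
  intro xs
  induction xs with
  | nil => intro _; rfl
  | cons x xs ih =>
    intro h
    have hx : ¬ q x := fun hqx => h x hqx List.mem_cons_self
    rw [List.filter_cons_of_pos (by simp [hx]),
        ih (fun p hp hm => h p hp (List.mem_cons_of_mem _ hm))]

-- core invariant of A's deletion loop: folding the remove-step over ys starting
-- from acc, where each bad element occurs in ys exactly as often as in acc,
-- yields acc with all bad elements filtered out.
theorem pv_loop_eq_filter {α : Type} [BEq α] [LawfulBEq α] (q : α → Prop) [DecidablePred q] :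
    ∀ (ys acc : List α), (∀ p, q p → ys.count p = acc.count p) →
    (ys.foldl (fun acc p =>
      if q p then pvRemoveStep acc p else acc) acc) = acc.filter (fun p => !decide (q p)) := by
  intro ys
  induction ys with
  | nil =>
    intro acc h
    refine (filter_of_no_bad q acc (fun p hp hm => ?_)).symm
    have h0 := (h p hp).symm
    rw [List.count_nil] at h0
    exact (List.count_pos_iff.mpr hm).ne' (by omega)
  | cons y ys ih =>
    intro acc h
    rw [List.foldl_cons]
    by_cases hq : q y
    · have hmem : y ∈ acc := by
        have hc := h y hq
        rw [List.count_cons_self] at hc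
        exact List.count_pos_iff.mp (by omega)
      have hstep : (if q y then pvRemoveStep acc y else acc) = acc.erase y := by
        rw [if_pos hq]
        unfold pvRemoveStep
        rw [PySem.List.remove?_eq_some_erase acc y hmem]
      rw [hstep, ih (acc.erase y) ?_, filter_erase_of_neg _ y (by simp [hq]) acc]
      intro p hp
      by_cases hpy : p = y
      · subst hpy
        have hc := h p hp
        rw [List.count_cons_self] at hc
        rw [List.count_erase_self]
        omega
      · have hc := h p hp
        rw [List.count_cons_of_ne (Ne.symm hpy)] at hc
        rw [List.count_erase_of_ne hpy]
        exact hc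
    · rw [if_neg hq]
      apply ih
      intro p hp
      have hpy : y ≠ p := fun he => hq (he ▸ hp)
      have hc := h p hp
      rwa [List.count_cons_of_ne hpy] at hc

-- B's boolean keep-test agrees pointwise with the negation of A's deletion test
theorem pv_keep_eq (row col : Int) (p : Int × Int) :
    (!decide (p.1 ≠ row ∧ p.2 ≠ col ∧
        ¬(PySem.Int.floordiv p.1 3 = PySem.Int.floordiv row 3 ∧
          PySem.Int.floordiv p.2 3 = PySem.Int.floordiv col 3))) = pvKeepB row col p := by
  unfold pvKeepB
  rw [Bool.eq_iff_iff]
  simp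
  tauto

-- A's loop applied to any list l1 (as both source and accumulator) = filter keep
theorem pv_main (row col : Int) (l1 : List (Int × Int)) :
    (l1.foldl (fun acc p =>
      if p.1 ≠ row ∧ p.2 ≠ col ∧
          ¬(PySem.Int.floordiv p.1 3 = PySem.Int.floordiv row 3 ∧
            PySem.Int.floordiv p.2 3 = PySem.Int.floordiv col 3) then
        pvRemoveStep acc p
      else acc) l1) = l1.filter (pvKeepB row col) := by
  have h1 := pv_loop_eq_filter (fun p => p.1 ≠ row ∧ p.2 ≠ col ∧
        ¬(PySem.Int.floordiv p.1 3 = PySem.Int.floordiv row 3 ∧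
          PySem.Int.floordiv p.2 3 = PySem.Int.floordiv col 3)) l1 l1 (fun _ _ => rfl)
  have h2 := List.filter_congr (l := l1) (fun p _ => pv_keep_eq row col p)
  exact h1.trans h2

-- once the flag is set, B's pass appends exactly the kept cells
theorem pvPassB_true (row col : Int) :
    ∀ (cells : List (Int × Int)) (out : List (Int × Int)),
      cells.foldl (pvPassB row col) (true, out) = (true, out ++ cells.filter (pvKeepB row col)) := by
  intro cells
  induction cells with
  | nil => intro out; simp
  | cons p rest ih =>
    intro out
    rw [List.foldl_cons]
    by_cases hk : pvKeepB row col p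
    · rw [show pvPassB row col (true, out) p = (true, out ++ [p]) from by simp [pvPassB, hk],
          ih, List.filter_cons_of_pos hk]
      simp
    · rw [show pvPassB row col (true, out) p = (true, out) from by simp [pvPassB, hk],
          ih, List.filter_cons_of_neg (by simpa using hk)]

-- before the flag is set, B's pass erases the first (row,col) (if any) and filters
theorem pvPassB_false (row col : Int) :
    ∀ (cells : List (Int × Int)) (out : List (Int × Int)),
      (cells.foldl (pvPassB row col) (false, out)).2 =
        out ++ (if (row, col) ∈ cells then (cells.erase (row, col)).filter (pvKeepB row col)
                else cells.filter (pvKeepB row col)) := by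
  intro cells
  induction cells with
  | nil => intro out; simp
  | cons p rest ih =>
    intro out
    rw [List.foldl_cons]
    show (List.foldl (pvPassB row col) (pvPassB row col (false, out) p) rest).2 = _
    by_cases hp : p = (row, col)
    · subst hp
      have hstep : pvPassB row col (false, out) (row, col) = (true, out) := by
        simp [pvPassB]
      rw [hstep, pvPassB_true]
      simp [List.erase_cons_head]
    · have hne' : p.1 = row → ¬p.2 = col := fun h1 h2 => hp (Prod.ext h1 h2)
      have hmem : ((row, col) ∈ p :: rest) ↔ ((row, col) ∈ rest) := by
        constructor
        · intro h
          rcases List.mem_cons.mp h with h | h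
          · exact absurd h.symm hp
          · exact h
        · exact List.mem_cons_of_mem p
      have herase : (p :: rest).erase (row, col) = p :: rest.erase (row, col) :=
        List.erase_cons_tail (by simpa using hp)
      by_cases hk : pvKeepB row col p
      · have hstep : pvPassB row col (false, out) p = (false, out ++ [p]) := by
          simp [pvPassB, hk]; exact hne'
        rw [hstep, ih]
        by_cases hm : (row, col) ∈ rest
        · rw [if_pos hm, if_pos (hmem.mpr hm), herase,
              List.filter_cons_of_pos hk]; simp
        · rw [if_neg hm, if_neg (fun h => hm (hmem.mp h)),
              List.filter_cons_of_pos hk]; simp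
      · have hstep : pvPassB row col (false, out) p = (false, out) := by
          simp [pvPassB, hk]; exact hne'
        rw [hstep, ih]
        by_cases hm : (row, col) ∈ rest
        · rw [if_pos hm, if_pos (hmem.mpr hm), herase,
              List.filter_cons_of_neg (by simpa using hk)]
        · rw [if_neg hm, if_neg (fun h => hm (hmem.mp h)),
              List.filter_cons_of_neg (by simpa using hk)]

-- A's pre-removal is List.erase when the element is present
theorem pvDropSelfA_eq (row col : Int) (xs : List (Int × Int)) :
    pvDropSelfA row col xs =
      if (row, col) ∈ xs then xs.erase (row, col) else xs := by
  unfold pvDropSelfA pvRemoveStep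
  by_cases h : (row, col) ∈ xs
  · rw [if_pos h, if_pos h, PySem.List.remove?_eq_some_erase xs _ h]
  · rw [if_neg h, if_neg h]

-- ===== VERDICT (by name: the statement is the Claim_ definition above) =====
theorem remove_uninflicted_positions_spec : Claim_equal_remove_uninflicted_positions := by
  intro row col l _
  unfold Spec_remove_uninflicted_positions
  have key : ∀ cells : List (Int × Int),
      (pvDropSelfA row col cells).foldl (fun acc p =>
        if p.1 ≠ row ∧ p.2 ≠ col ∧
            ¬(PySem.Int.floordiv p.1 3 = PySem.Int.floordiv row 3 ∧
              PySem.Int.floordiv p.2 3 = PySem.Int.floordiv col 3) then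
          pvRemoveStep acc p
        else acc) (pvDropSelfA row col cells) =
      (cells.foldl (pvPassB row col) (false, [])).2 := by
    intro cells
    rw [pv_main, pvPassB_false row col cells [], List.nil_append, pvDropSelfA_eq]
    by_cases h : (row, col) ∈ cells
    · rw [if_pos h, if_pos h]
    · rw [if_neg h, if_neg h]
  cases l with
  | none => exact key pvGrid
  | some xs => exact key xs
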